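-- pv_equiv track=rewrite | github.com/zeunny/APS | programmers/12900.py | solution
-- ===== SOURCE A (Python) =====
-- def solution(n):
--     tile = [0]*60001
--     tile[1] = 1
--     tile[2] = 2
--     tile[3] = 3
--
--     for i in range(4, n+1):
--         tile[i] = (tile[i-2] + tile[i-1])%1000000007
--
--     return tile[n]
-- ===== SOURCE B (Python) =====
-- def solution(n):
--     # Fast-doubling Fibonacci mod 1e9+7: the tiling count for width n is F(n+1)
--     # with F(1)=F(2)=1.  O(log n) instead of A's O(n) table fill.
--     M = 1000000007
--     if n < 1:
--         return 0
--
--     def fib_pair(k):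
--         # returns (F(k) % M, F(k+1) % M)
--         if k == 0:
--             return (0, 1)
--         a, b = fib_pair(k // 2)
--         c = a * (2 * b - a) % M
--         d = (a * a + b * b) % M
--         if k % 2 == 0:
--             return (c, d)
--         return (d, (c + d) % M)
--
--     return fib_pair(n + 1)[0]
-- ===== Notes on version B (the rewrite author's own statement) =====
-- stated objective: faster
-- what changed: Replaced the 60001-entry DP table filled left-to-right by a recursive fast-doubling computation of Fibonacci numbers modulo 1e9+7 (the tiling count for width n is F(n+1)), and B returns 0 for nonpositive widths.
-- intended difference: For n in {-60000, -59999, -59998} A's negative index wraps around into the pre-seeded cells tile[1..3] and returns 1, 2 or 3, while B returns 0 as it does for every other nonpositive width; 0 is the intended count since the seeds were never meant to be reachable from below. — e.g. on solution(-60000): A returns 1, B returns 0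
import Mathlib
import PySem

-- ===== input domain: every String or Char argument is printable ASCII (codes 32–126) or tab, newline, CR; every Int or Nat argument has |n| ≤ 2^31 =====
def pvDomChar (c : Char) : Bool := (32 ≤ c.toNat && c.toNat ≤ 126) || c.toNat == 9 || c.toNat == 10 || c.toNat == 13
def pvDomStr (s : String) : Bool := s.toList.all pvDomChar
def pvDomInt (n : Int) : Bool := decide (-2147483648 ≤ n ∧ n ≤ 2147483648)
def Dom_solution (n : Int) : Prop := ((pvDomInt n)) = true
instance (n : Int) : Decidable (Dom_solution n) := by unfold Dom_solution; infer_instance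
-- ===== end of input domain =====

-- B replaces A's 60001-entry DP table by fast-doubling Fibonacci mod 1e9+7 (objective: faster).

-- ===== PORT A =====
-- Literal transliteration of A: the fixed-size table, three seed writes, the fill loop, the
-- final read.  A Python list is a mutable array, so tile is an Array Int (O(1) writes, as in
-- Python).  Every index written or read by the loop satisfies 4 ≤ i ≤ n, so i, i-2, i-1 are
-- nonnegative in-range indices inside Pre_solution and toNat / getD / setIfInBounds are exact
-- there; the final read tile[n] may see a negative n and is ported with the Python-exact
-- PySem.List.pyGetD (negative-index wraparound), in range exactly when Pre_solution holds.
def solution (n : Int) : Int :=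
  let tile : Array Int := Array.replicate 60001 (0 : Int)
  let tile := tile.setIfInBounds 1 1
  let tile := tile.setIfInBounds 2 2
  let tile := tile.setIfInBounds 3 3
  let tile := (PySem.List.pyRange 4 (n + 1) 1).foldl
    (fun t i => t.setIfInBounds i.toNat
      (PySem.Int.mod (t.getD (i - 2).toNat 0 + t.getD (i - 1).toNat 0) 1000000007)) tile
  PySem.List.pyGetD tile.toList n 0

-- ===== PORT B =====
-- fib_pair from Source B; k // 2 on a nonnegative Python int is Nat division, recursion on k.
def fibPair (k : Nat) : Int × Int :=
  if h : k = 0 then (0, 1)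
  else
    let p := fibPair (k / 2)
    let c := PySem.Int.mod (p.1 * (2 * p.2 - p.1)) 1000000007
    let d := PySem.Int.mod (p.1 * p.1 + p.2 * p.2) 1000000007
    if k % 2 = 0 then (c, d) else (d, PySem.Int.mod (c + d) 1000000007)
decreasing_by exact Nat.div_lt_self (Nat.pos_of_ne_zero h) (by omega)

def solution_alt (n : Int) : Int :=
  if n < 1 then 0 else (fibPair (n + 1).toNat).1

-- ===== PRECONDITION & SPEC =====
-- Pre_solution is exactly the set of inputs on which the Python A returns: for n > 60000 the
-- loop assignment tile[i] raises IndexError at i = 60001, and for n < -60001 the final tile[n]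
-- raises IndexError.
def Pre_solution (n : Int) : Prop := -60001 ≤ n ∧ n ≤ 60000
instance (n : Int) : Decidable (Pre_solution n) := by unfold Pre_solution; infer_instance
def pvWitness_solution : Int := 10

-- For n in {-60000, -59999, -59998} A's negative index wraps around into the pre-seeded cells
-- tile[1..3] and returns 1, 2 or 3, while B returns 0 as for every other nonpositive width;
-- 0 is the intended count since the seed cells were never meant to be reachable from below.
def D_solution (n : Int) : Prop := n = -60000 ∨ n = -59999 ∨ n = -59998
instance (n : Int) : Decidable (D_solution n) := by unfold D_solution; infer_instance

def Spec_solution (n : Int) (out : Int) : Prop := ¬ D_solution n → out = solution_alt n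
instance (n : Int) (out : Int) : Decidable (Spec_solution n out) := by unfold Spec_solution; infer_instance

def pvDiffWitness_solution : Int := -60000
def pvDiffWitnessOut_solution : Int × Int := (1, 0)

-- ===== CLAIM (what is proved, stated in full; the proofs are below) =====
def Claim_unchanged_solution : Prop := ∀ (n : Int), Dom_solution n → Pre_solution n → Spec_solution n (solution n)
def Claim_changed_solution : Prop := Dom_solution (pvDiffWitness_solution) ∧ Pre_solution (pvDiffWitness_solution) ∧ D_solution (pvDiffWitness_solution) ∧ solution (pvDiffWitness_solution) = pvDiffWitnessOut_solution.1 ∧ solution_alt (pvDiffWitness_solution) = pvDiffWitnessOut_solution.2 ∧ pvDiffWitnessOut_solution.1 ≠ pvDiffWitnessOut_solution.2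
def Claim_exact_solution : Prop := ∀ (n : Int), Dom_solution n → Pre_solution n → D_solution n → solution n ≠ solution_alt n

-- ===== LEMMAS AND PROOFS =====

-- B-side correctness: fibPair k = (F(k) mod p, F(k+1) mod p).
theorem fibPair_eq (k : Nat) :
    fibPair k = ((Nat.fib k : Int) % 1000000007, (Nat.fib (k + 1) : Int) % 1000000007) := by
  induction k using Nat.strong_induction_on with
  | _ k ih =>
    rw [fibPair]
    by_cases h : k = 0
    · subst h; norm_num
    · rw [dif_neg h]
      have ihm := ih (k / 2) (Nat.div_lt_self (Nat.pos_of_ne_zero h) (by omega))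
      rw [ihm]
      set m := k / 2 with hm
      set A : Int := (Nat.fib m : Int) with hA
      set B : Int := (Nat.fib (m + 1) : Int) with hB
      have hAm : A % 1000000007 ≡ A [ZMOD 1000000007] := Int.emod_emod_of_dvd A dvd_rfl
      have hBm : B % 1000000007 ≡ B [ZMOD 1000000007] := Int.emod_emod_of_dvd B dvd_rfl
      have h2b : (Nat.fib (2 * m) : Int) = A * (2 * B - A) := by
        have hle : Nat.fib m ≤ 2 * Nat.fib (m + 1) :=
          le_trans Nat.fib_le_fib_succ (by omega)
        rw [Nat.fib_two_mul]
        push_cast [hle]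
        ring
      have h2b1 : (Nat.fib (2 * m + 1) : Int) = A * A + B * B := by
        rw [Nat.fib_two_mul_add_one]; push_cast; ring
      have hc : PySem.Int.mod (A % 1000000007 * (2 * (B % 1000000007) - A % 1000000007)) 1000000007
          = (Nat.fib (2 * m) : Int) % 1000000007 := by
        rw [PySem.Int.mod_eq_emod_of_pos (by norm_num), h2b]
        exact hAm.mul ((hBm.mul_left 2).sub hAm)
      have hd : PySem.Int.mod (A % 1000000007 * (A % 1000000007) + B % 1000000007 * (B % 1000000007)) 1000000007
          = (Nat.fib (2 * m + 1) : Int) % 1000000007 := by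
        rw [PySem.Int.mod_eq_emod_of_pos (by norm_num), h2b1]
        exact (hAm.mul hAm).add (hBm.mul hBm)
      by_cases hp : k % 2 = 0
      · have hk : 2 * m = k := by omega
        simp only [hp, if_true]
        rw [hc, hd, hk]
      · have hk : 2 * m + 1 = k := by omega
        simp only [hp, if_false]
        rw [hc, hd]
        have hsum : PySem.Int.mod ((Nat.fib (2 * m) : Int) % 1000000007 + (Nat.fib (2 * m + 1) : Int) % 1000000007) 1000000007
            = (Nat.fib (k + 1) : Int) % 1000000007 := by
          rw [PySem.Int.mod_eq_emod_of_pos (by norm_num), ← Int.add_emod]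
          have : Nat.fib (2 * m) + Nat.fib (2 * m + 1) = Nat.fib (k + 1) := by
            rw [← hk]; exact (Nat.fib_add_two).symm
          push_cast [← this]
          ring_nf
        rw [hsum, hk]

-- A-side: a List model of the array the loop manipulates.
def pvBody (t : List Int) (i : Int) : List Int :=
  t.set i.toNat (PySem.Int.mod (t.getD (i - 2).toNat 0 + t.getD (i - 1).toNat 0) 1000000007)

def pvInit : List Int := (((List.replicate 60001 (0 : Int)).set 1 1).set 2 2).set 3 3

theorem arr_getD (a : Array Int) (i : Nat) (d : Int) : a.getD i d = a.toList.getD i d := by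
  rcases a with ⟨l⟩
  simp [Array.getD, List.getD]
  split <;> simp_all

theorem foldl_toList (rng : List Int) (t : Array Int) :
    (rng.foldl
      (fun t i => t.setIfInBounds i.toNat
        (PySem.Int.mod (t.getD (i - 2).toNat 0 + t.getD (i - 1).toNat 0) 1000000007)) t).toList
    = rng.foldl pvBody t.toList := by
  induction rng generalizing t with
  | nil => rfl
  | cons x xs ihx =>
    rw [List.foldl_cons, List.foldl_cons, ihx]
    unfold pvBody
    rw [Array.toList_setIfInBounds, arr_getD, arr_getD]

theorem solution_eq (n : Int) :
    solution n = PySem.List.pyGetD ((PySem.List.pyRange 4 (n + 1) 1).foldl pvBody pvInit) n 0 := by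
  show PySem.List.pyGetD
      (((PySem.List.pyRange 4 (n + 1) 1).foldl
        (fun t i => t.setIfInBounds i.toNat
          (PySem.Int.mod (t.getD (i - 2).toNat 0 + t.getD (i - 1).toNat 0) 1000000007))
        ((((Array.replicate 60001 (0 : Int)).setIfInBounds 1 1).setIfInBounds 2
            2).setIfInBounds 3 3)).toList)
      n 0 = _
  rw [foldl_toList]
  rw [Array.toList_setIfInBounds, Array.toList_setIfInBounds, Array.toList_setIfInBounds,
      Array.toList_replicate, ← pvInit]

theorem pvInit_length : pvInit.length = 60001 := by
  unfold pvInit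
  rw [List.length_set, List.length_set, List.length_set, List.length_replicate]

theorem pvInit_getElem? (j : Nat) (hj : j < 60001) :
    pvInit[j]? = some (if j = 1 then 1 else if j = 2 then 2 else if j = 3 then (3 : Int) else 0) := by
  unfold pvInit
  by_cases h3 : j = 3
  · subst h3
    rw [List.getElem?_set_self (by simp only [List.length_set, List.length_replicate]; omega)]
    norm_num
  · rw [List.getElem?_set_ne (by omega)]
    by_cases h2 : j = 2
    · subst h2
      rw [List.getElem?_set_self (by simp only [List.length_set, List.length_replicate]; omega)]
      norm_num
    · rw [List.getElem?_set_ne (by omega)]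
      by_cases h1 : j = 1
      · subst h1
        rw [List.getElem?_set_self (by simp only [List.length_replicate]; omega)]
        norm_num
      · rw [List.getElem?_set_ne (by omega), List.getElem?_replicate,
            if_pos hj, if_neg h1, if_neg h2, if_neg h3]

-- A's table with a negative final index: Python wraps to index 60001 + n.
theorem pyGetD_pvInit_neg (k : Nat) (hk1 : 0 < k) (hk2 : k ≤ 60001) :
    PySem.List.pyGetD pvInit (-(k : Int)) 0 =
      (if k = 60000 then 1 else if k = 59999 then 2 else if k = 59998 then (3 : Int) else 0) := by
  rw [PySem.List.pyGetD_neg_natCast pvInit k 0 hk1 (by rw [pvInit_length]; omega)]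
  have h := pvInit_getElem? (pvInit.length - k) (by rw [pvInit_length]; omega)
  rw [List.getElem?_eq_getElem (by rw [pvInit_length]; omega)] at h
  have h' := Option.some.inj h
  rw [h', pvInit_length]
  split_ifs with a b c d e f g <;> omega

-- The loop state after filling up to index m.
def pvS (m : Nat) : List Int := (PySem.List.pyRange 4 ((m : Int) + 1) 1).foldl pvBody pvInit

theorem pvS_inv (m : Nat) (hm : m ≤ 60000) :
    (pvS m).length = 60001 ∧
      ∀ j : Nat, 1 ≤ j → j ≤ m →
        (pvS m)[j]? = some ((Nat.fib (j + 1) : Int) % 1000000007) := by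
  induction m with
  | zero =>
    refine ⟨?_, fun j hj1 hj2 => by omega⟩
    have h0 : pvS 0 = pvInit := by
      unfold pvS
      rw [PySem.List.pyRange_one_eq_nil (by norm_num), List.foldl_nil]
    rw [h0, pvInit_length]
  | succ m ih =>
    obtain ⟨ihlen, ihget⟩ := ih (by omega)
    by_cases hsmall : m + 1 ≤ 3
    · have heq : pvS (m + 1) = pvInit := by
        unfold pvS
        rw [PySem.List.pyRange_one_eq_nil (by push_cast; omega), List.foldl_nil]
      refine ⟨by rw [heq, pvInit_length], fun j hj1 hj2 => ?_⟩
      rw [heq, pvInit_getElem? j (by omega)]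
      have hj3 : j ≤ 3 := by omega
      interval_cases j <;> decide
    · -- m ≥ 3: one more loop iteration
      have hstep : pvS (m + 1) = pvBody (pvS m) ((m : Int) + 1) := by
        unfold pvS
        have : ((m + 1 : Nat) : Int) + 1 = ((m : Int) + 1) + 1 := by push_cast; ring
        rw [this, PySem.List.pyRange_one_succ_right (by omega), List.foldl_append]
        rfl
      set t := pvS m with ht
      have hgetm1 : t.getD ((m : Int) + 1 - 2).toNat 0 = (Nat.fib m : Int) % 1000000007 := by
        have hidx : ((m : Int) + 1 - 2).toNat = m - 1 := by omega
        rw [hidx, List.getD_eq_getElem?_getD, ihget (m - 1) (by omega) (by omega)]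
        have : m - 1 + 1 = m := by omega
        rw [this, Option.getD_some]
      have hgetm : t.getD ((m : Int) + 1 - 1).toNat 0 = (Nat.fib (m + 1) : Int) % 1000000007 := by
        have hidx : ((m : Int) + 1 - 1).toNat = m := by omega
        rw [hidx, List.getD_eq_getElem?_getD, ihget m (by omega) (by omega), Option.getD_some]
      have hval : PySem.Int.mod (t.getD ((m : Int) + 1 - 2).toNat 0 + t.getD ((m : Int) + 1 - 1).toNat 0) 1000000007
          = (Nat.fib (m + 2) : Int) % 1000000007 := by
        rw [hgetm1, hgetm, PySem.Int.mod_eq_emod_of_pos (by norm_num), ← Int.add_emod]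
        have : (Nat.fib (m + 2) : Int) = (Nat.fib m : Int) + (Nat.fib (m + 1) : Int) := by
          rw [Nat.fib_add_two]; push_cast; ring
        rw [this]
      have hset : pvS (m + 1) = t.set (m + 1) ((Nat.fib (m + 2) : Int) % 1000000007) := by
        rw [hstep]
        unfold pvBody
        rw [hval]
        have : ((m : Int) + 1).toNat = m + 1 := by omega
        rw [this]
      constructor
      · rw [hset, List.length_set, ihlen]
      · intro j hj1 hj2
        rw [hset]
        by_cases hj : j = m + 1
        · subst hj
          rw [List.getElem?_set_self (by rw [ihlen]; omega)]
        · rw [List.getElem?_set_ne (by omega), ihget j hj1 (by omega)]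

-- the two cases of A's behaviour, as reusable equalities
theorem solution_of_pos (n : Int) (h1 : 1 ≤ n) (h2 : n ≤ 60000) :
    solution n = (Nat.fib (n.toNat + 1) : Int) % 1000000007 := by
  obtain ⟨hlen, hget⟩ := pvS_inv n.toNat (by omega)
  have hn : n = ((n.toNat : Nat) : Int) := by omega
  rw [solution_eq, hn]
  have : (PySem.List.pyRange 4 (((n.toNat : Nat) : Int) + 1) 1).foldl pvBody pvInit = pvS n.toNat := rfl
  rw [this, PySem.List.pyGetD_natCast, List.getD_eq_getElem?_getD,
      hget n.toNat (by omega) (by omega), Option.getD_some]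
  rw [Int.toNat_natCast]

theorem solution_of_nonpos (n : Int) (h0 : n ≤ 0) (h1 : -60001 ≤ n) :
    solution n = PySem.List.pyGetD pvInit n 0 := by
  rw [solution_eq, PySem.List.pyRange_one_eq_nil (by omega), List.foldl_nil]

-- ===== VERDICT (by name: the statement is the Claim_ definition above) =====
theorem solution_spec : Claim_unchanged_solution := by
  intro n _ hpre hnD
  obtain ⟨hlo, hhi⟩ := hpre
  unfold solution_alt
  by_cases hn : n < 1
  · rw [if_pos hn, solution_of_nonpos n (by omega) hlo]
    by_cases h0 : n = 0
    · subst h0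
      rw [PySem.List.pyGetD_zero, List.getD_eq_getElem?_getD, pvInit_getElem? 0 (by omega)]
      norm_num
    · have hk : n = -(((-n).toNat : Nat) : Int) := by omega
      rw [hk, pyGetD_pvInit_neg (-n).toNat (by omega) (by omega)]
      unfold D_solution at hnD
      have k1 : (-n).toNat ≠ 60000 := by omega
      have k2 : (-n).toNat ≠ 59999 := by omega
      have k3 : (-n).toNat ≠ 59998 := by omega
      rw [if_neg k1, if_neg k2, if_neg k3]
  · rw [if_neg hn, solution_of_pos n (by omega) hhi]
    have : (n + 1).toNat = n.toNat + 1 := by omega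
    rw [this, fibPair_eq]

theorem solution_changed : Claim_changed_solution := by
  unfold Claim_changed_solution
  refine ⟨by decide, by decide, by decide, ?_, by decide, by decide⟩
  show solution (-60000) = 1
  have h1 : solution (-60000) = PySem.List.pyGetD pvInit (-60000) 0 :=
    solution_of_nonpos (-60000) (by omega) (by omega)
  have h2 : PySem.List.pyGetD pvInit (-60000) 0 = 1 := by
    rw [show (-60000 : Int) = -((60000 : Nat) : Int) by norm_num,
        pyGetD_pvInit_neg 60000 (by omega) (by omega)]
    norm_num
  exact h1.trans h2

theorem solution_tight : Claim_exact_solution := by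
  intro n _ _ hD
  unfold D_solution at hD
  have halt : solution_alt n = 0 := by
    unfold solution_alt
    rw [if_pos (by omega)]
  rw [halt]
  rcases hD with h' | h' | h' <;> subst h'
  · rw [solution_of_nonpos _ (by omega) (by omega),
        show (-60000 : Int) = -((60000 : Nat) : Int) by norm_num,
        pyGetD_pvInit_neg 60000 (by omega) (by omega)]
    norm_num
  · rw [solution_of_nonpos _ (by omega) (by omega),
        show (-59999 : Int) = -((59999 : Nat) : Int) by norm_num,
        pyGetD_pvInit_neg 59999 (by omega) (by omega)]
    norm_num
  · rw [solution_of_nonpos _ (by omega) (by omega),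
        show (-59998 : Int) = -((59998 : Nat) : Int) by norm_num,
        pyGetD_pvInit_neg 59998 (by omega) (by omega)]
    norm_num
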